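-- pv_equiv track=rewrite | github.com/DraganRatkovich/newfon | addon/synthDrivers/newfon/languages/sh_numbers.py | dajLiczbeBezNieznaczacychZerNaPoczatku
-- ===== SOURCE A (Python) =====
-- def dajDlugoscNapisu(napis):
--  dlugosc=len(napis)
--  return dlugosc
--
-- def dajZnakNapisu(napis, indeks):
--  if (indeks>0) and (indeks<=len(napis)):
--   znak=napis[(indeks-1)]
--  else:
--   znak=chr(0)
--  return znak
--
-- def dajFragmentNapisu(napis, indeks, dlugoscFragmentu):
--  dlugoscNapisu=len(napis)
--  fragment=''
--  if (indeks>0) and (indeks<=dlugoscNapisu):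
--   if ((indeks+dlugoscFragmentu-1)>0) and ((indeks+dlugoscFragmentu-1)<=dlugoscNapisu):
--    if (indeks<=(indeks+dlugoscFragmentu-1)):
--     fragment=napis[(indeks-1):((indeks-1)+dlugoscFragmentu)]
--  return fragment
--
-- def wartosciaNapisuJestPoprawnaLiczbaNaturalna(napis):
--  indeks=0
--  dlugosc=dajDlugoscNapisu(napis)
--  jestLiczba=False
--  znak=chr(0)
--  if dlugosc>0:
--   indeks=1
--   jestLiczba=True
--   while (indeks<=dlugosc) and jestLiczba:
--    znak=dajZnakNapisu(napis, indeks)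
--    if (znak>='0') and (znak<='9'):
--     indeks=indeks+1
--    else:
--     jestLiczba=False
--  return jestLiczba
--
-- def dajLiczbeBezNieznaczacychZerNaPoczatku(napis):
--  napis_1=''
--  indeks=0
--  dlugosc=dajDlugoscNapisu(napis)
--  jeszcze=False
--  if wartosciaNapisuJestPoprawnaLiczbaNaturalna(napis):
--   indeks=1
--   jeszcze=True
--   while (indeks<dlugosc) and jeszcze:
--    if (dajZnakNapisu(napis, indeks)=='0'):
--     indeks=indeks+1
--    else:
--     jeszcze=False
--   napis_1=dajFragmentNapisu(napis, indeks, dlugosc-indeks+1)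
--  return napis_1
-- ===== SOURCE B (Python) =====
-- def dajLiczbeBezNieznaczacychZerNaPoczatku(napis):
--     wartosc = 0
--     for znak in napis:
--         if not ('0' <= znak <= '9'):
--             return ''
--         wartosc = wartosc * 10 + (ord(znak) - 48)
--     if not napis:
--         return ''
--     cyfry = ''
--     while wartosc > 9:
--         cyfry = chr(48 + wartosc % 10) + cyfry
--         wartosc //= 10
--     return chr(48 + wartosc) + cyfry
-- ===== Notes on version B (the rewrite author's own statement) =====
-- stated objective: alternative
-- what changed: Instead of scanning for the first non-zero character and slicing the string (A's two while loops over 1-based index helpers), B converts the digit string to its integer value with a single accumulating pass and then re-emits the decimal digits of that value by repeated divmod 10, so the leading zeros disappear arithmetically rather than by stripping.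
import Mathlib
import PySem

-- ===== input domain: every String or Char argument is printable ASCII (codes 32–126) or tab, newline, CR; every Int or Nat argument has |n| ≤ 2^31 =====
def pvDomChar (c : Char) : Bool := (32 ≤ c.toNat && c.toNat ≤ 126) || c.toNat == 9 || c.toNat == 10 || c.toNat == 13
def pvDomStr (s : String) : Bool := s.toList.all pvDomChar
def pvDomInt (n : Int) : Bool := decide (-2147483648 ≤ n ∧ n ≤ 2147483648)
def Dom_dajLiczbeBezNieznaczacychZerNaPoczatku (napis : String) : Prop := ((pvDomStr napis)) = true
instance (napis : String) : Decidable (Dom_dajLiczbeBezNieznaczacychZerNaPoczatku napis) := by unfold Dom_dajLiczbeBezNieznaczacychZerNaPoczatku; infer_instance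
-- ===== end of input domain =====

-- B replaces A's scan-for-first-nonzero-and-slice by arithmetic: one pass folds the
-- digit string into its numeric value, then the decimal digits of that value are
-- re-emitted by repeated divmod 10 — leading zeros vanish arithmetically.
-- Objective 'alternative': same O(n) cost, genuinely different mechanism.

-- ===== PORT A =====
def dajDlugoscNapisu (napis : String) : Int :=
  (napis.toList.length : Int)

def dajZnakNapisu (napis : String) (indeks : Int) : Char :=
  if 0 < indeks ∧ indeks ≤ (napis.toList.length : Int) then
    (PySem.List.pyGet? napis.toList (indeks - 1)).getD (Char.ofNat 0)
  else
    Char.ofNat 0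

def dajFragmentNapisu (napis : String) (indeks : Int) (dlugoscFragmentu : Int) : String :=
  let dlugoscNapisu : Int := (napis.toList.length : Int)
  if 0 < indeks ∧ indeks ≤ dlugoscNapisu then
    if 0 < indeks + dlugoscFragmentu - 1 ∧ indeks + dlugoscFragmentu - 1 ≤ dlugoscNapisu then
      if indeks ≤ indeks + dlugoscFragmentu - 1 then
        String.ofList (PySem.List.slice napis.toList (some (indeks - 1)) (some ((indeks - 1) + dlugoscFragmentu)))
      else ""
    else ""
  else ""

-- the 'while (indeks<=dlugosc) and jestLiczba' loop of wartoscia…; fuel bounds the iterations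
def pvValidLoop (napis : String) (dlugosc indeks : Int) (jestLiczba : Bool) : Nat → Bool
  | 0 => jestLiczba
  | fuel + 1 =>
    if indeks ≤ dlugosc ∧ jestLiczba then
      let znak := dajZnakNapisu napis indeks
      if '0' ≤ znak ∧ znak ≤ '9' then
        pvValidLoop napis dlugosc (indeks + 1) jestLiczba fuel
      else
        pvValidLoop napis dlugosc indeks false fuel
    else jestLiczba

def wartosciaNapisuJestPoprawnaLiczbaNaturalna (napis : String) : Bool :=
  let dlugosc := dajDlugoscNapisu napis
  if dlugosc > 0 then
    pvValidLoop napis dlugosc 1 true (dlugosc.toNat + 2)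
  else false

-- the 'while (indeks<dlugosc) and jeszcze' loop of A's main function; returns the final indeks
def pvZeroLoop (napis : String) (dlugosc indeks : Int) (jeszcze : Bool) : Nat → Int
  | 0 => indeks
  | fuel + 1 =>
    if indeks < dlugosc ∧ jeszcze then
      if dajZnakNapisu napis indeks = '0' then
        pvZeroLoop napis dlugosc (indeks + 1) jeszcze fuel
      else
        pvZeroLoop napis dlugosc indeks false fuel
    else indeks

def dajLiczbeBezNieznaczacychZerNaPoczatku (napis : String) : String :=
  let dlugosc := dajDlugoscNapisu napis
  if wartosciaNapisuJestPoprawnaLiczbaNaturalna napis then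
    let indeks := pvZeroLoop napis dlugosc 1 true (dlugosc.toNat + 2)
    dajFragmentNapisu napis indeks (dlugosc - indeks + 1)
  else ""

-- ===== PORT B =====
-- Source B's for-loop with an early 'return '''' on a non-digit: the accumulator is the
-- numeric value so far, none signals the early empty return
def pvParse? : List Char → Nat → Option Nat
  | [], wartosc => some wartosc
  | znak :: reszta, wartosc =>
    if '0' ≤ znak ∧ znak ≤ '9' then
      pvParse? reszta (wartosc * 10 + (znak.toNat - 48))
    else none

-- Source B's 'while wartosc > 9' digit-emitting loop, plus the final 'chr(48+wartosc) + cyfry'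
def pvEmit (wartosc : Nat) (cyfry : List Char) : List Char :=
  if 9 < wartosc then
    pvEmit (wartosc / 10) (Char.ofNat (48 + wartosc % 10) :: cyfry)
  else
    Char.ofNat (48 + wartosc) :: cyfry
termination_by wartosc
decreasing_by exact Nat.div_lt_self (by omega) (by omega)

def dajLiczbeBezNieznaczacychZerNaPoczatku_alt (napis : String) : String :=
  match pvParse? napis.toList 0 with
  | none => ""
  | some wartosc =>
    if napis.toList = [] then ""
    else String.ofList (pvEmit wartosc [])

-- ===== PRECONDITION & SPEC =====
def Spec_dajLiczbeBezNieznaczacychZerNaPoczatku (napis : String) (out : String) : Prop := out = dajLiczbeBezNieznaczacychZerNaPoczatku_alt napis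
instance (napis : String) (out : String) : Decidable (Spec_dajLiczbeBezNieznaczacychZerNaPoczatku napis out) := by unfold Spec_dajLiczbeBezNieznaczacychZerNaPoczatku; infer_instance

-- ===== CLAIM (what is proved, stated in full; the proofs are below) =====
def Claim_equal_dajLiczbeBezNieznaczacychZerNaPoczatku : Prop := ∀ (napis : String), Dom_dajLiczbeBezNieznaczacychZerNaPoczatku napis → Spec_dajLiczbeBezNieznaczacychZerNaPoczatku napis (dajLiczbeBezNieznaczacychZerNaPoczatku napis)

-- ===== LEMMAS AND PROOFS =====

-- the digit test both programs use, as a Bool predicate on characters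
def pvDigit (c : Char) : Bool := decide ('0' ≤ c) && decide (c ≤ '9')

-- the numeric value of a digit list (Source B's accumulator after the for-loop)
def pvVal (l : List Char) : Nat := l.foldl (fun a c => a * 10 + (c.toNat - 48)) 0

theorem pvDigit_toNat (c : Char) (h : pvDigit c = true) :
    48 ≤ c.toNat ∧ c.toNat ≤ 57 := by
  simp only [pvDigit, Bool.and_eq_true, decide_eq_true_eq, Char.le_def] at h
  obtain ⟨h1, h2⟩ := h
  constructor
  · exact h1
  · exact h2

theorem pvDigit_ofNat (c : Char) (h : pvDigit c = true) :
    Char.ofNat (48 + (c.toNat - 48)) = c := by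
  have := pvDigit_toNat c h
  have h48 : 48 + (c.toNat - 48) = c.toNat := by omega
  rw [h48, Char.ofNat_toNat]

theorem pvDigit_ne_zero (c : Char) (h : pvDigit c = true) (hne : c ≠ '0') :
    1 ≤ c.toNat - 48 := by
  have ht := pvDigit_toNat c h
  by_contra hcon
  have h48 : c.toNat = 48 := by omega
  apply hne
  rw [← Char.ofNat_toNat c, h48]

theorem pv_takeWhile_length_le {α : Type} (p : α → Bool) (l : List α) :
    (l.takeWhile p).length ≤ l.length :=
  (List.takeWhile_prefix p).length_le

theorem pv_takeWhile_getElem_true {α : Type} (p : α → Bool) (l : List α)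
    (j : Nat) (hj : j < (l.takeWhile p).length) (hjl : j < l.length) :
    p l[j] = true := by
  have h1 : (l.takeWhile p)[j] = l[j] := (List.takeWhile_prefix p).getElem hj
  have h2 : (l.takeWhile p)[j] ∈ l.takeWhile p := List.getElem_mem hj
  have := List.mem_takeWhile_imp h2
  rwa [h1] at this

theorem pv_takeWhile_getElem_false {α : Type} (p : α → Bool) (l : List α)
    (h : (l.takeWhile p).length < l.length) :
    p (l[(l.takeWhile p).length]'h) = false := by
  induction l with
  | nil => simp at h
  | cons c t ih =>
    by_cases hc : p c = true
    · simp [hc] at h ⊢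
      exact ih h
    · simp [Bool.not_eq_true] at hc
      simp [hc]

theorem pv_dropWhile_eq_drop {α : Type} (p : α → Bool) (l : List α) :
    l.dropWhile p = l.drop (l.takeWhile p).length := by
  calc l.dropWhile p
      = List.drop (l.takeWhile p).length (l.takeWhile p ++ l.dropWhile p) := by
        rw [List.drop_left]
    _ = l.drop (l.takeWhile p).length := by
        rw [List.takeWhile_append_dropWhile]

theorem pv_znak (napis : String) (j : Nat) (hj : j < napis.toList.length) :
    dajZnakNapisu napis ((j : Int) + 1) = napis.toList[j] := by
  unfold dajZnakNapisu
  rw [if_pos (by constructor <;> omega)]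
  have : ((j : Int) + 1 - 1) = (j : Int) := by omega
  rw [this, PySem.List.pyGet?_natCast, List.getElem?_eq_getElem hj]
  rfl

theorem pvValidLoop_false (napis : String) (d i : Int) (fuel : Nat) :
    pvValidLoop napis d i false fuel = false := by
  cases fuel <;> simp [pvValidLoop]

theorem pvValidLoop_eq (napis : String) (j : Nat) (fuel : Nat)
    (hj : j ≤ napis.toList.length) (hf : napis.toList.length - j < fuel) :
    pvValidLoop napis (napis.toList.length : Int) ((j : Int) + 1) true fuel
      = (napis.toList.drop j).all pvDigit := by
  induction fuel generalizing j with
  | zero => omega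
  | succ fuel ih =>
    by_cases hlt : j < napis.toList.length
    · rw [pvValidLoop, if_pos (by constructor <;> [omega; rfl])]
      rw [List.drop_eq_getElem_cons hlt, List.all_cons]
      rw [pv_znak napis j hlt]
      by_cases hd : pvDigit (napis.toList[j]) = true
      · have hd' : '0' ≤ napis.toList[j] ∧ napis.toList[j] ≤ '9' := by
          simpa [pvDigit] using hd
        rw [if_pos hd']
        have : ((j : Int) + 1 + 1) = ((j + 1 : Nat) : Int) + 1 := by push_cast; ring
        rw [this, ih (j + 1) (by omega) (by omega)]
        simp [hd]
      · have hd' : ¬ ('0' ≤ napis.toList[j] ∧ napis.toList[j] ≤ '9') := by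
          simpa [pvDigit] using hd
        rw [if_neg hd', pvValidLoop_false]
        simp [Bool.not_eq_true] at hd
        simp [hd]
    · have hje : j = napis.toList.length := by omega
      rw [pvValidLoop, if_neg (by rintro ⟨h, -⟩; omega), hje, List.drop_length]
      simp

theorem pv_valid_eq (napis : String) :
    wartosciaNapisuJestPoprawnaLiczbaNaturalna napis
      = (decide (napis.toList ≠ []) && napis.toList.all pvDigit) := by
  unfold wartosciaNapisuJestPoprawnaLiczbaNaturalna dajDlugoscNapisu
  by_cases hn : napis.toList.length > 0
  · rw [if_pos (by exact_mod_cast hn)]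
    have h0 : ((0 : Nat) : Int) + 1 = (1 : Int) := by norm_num
    have := pvValidLoop_eq napis 0 ((napis.toList.length : Int).toNat + 2) (by omega)
      (by omega)
    rw [h0] at this
    rw [this, List.drop_zero]
    have : napis.toList ≠ [] := by
      intro h; rw [h] at hn; simp at hn
    simp [this]
  · rw [if_neg (by exact_mod_cast hn)]
    have : napis.toList = [] := by
      cases h : napis.toList with
      | nil => rfl
      | cons a t => rw [h] at hn; simp at hn
    simp [this]

theorem pvZeroLoop_false (napis : String) (d i : Int) (fuel : Nat) :
    pvZeroLoop napis d i false fuel = i := by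
  cases fuel <;> simp [pvZeroLoop]

theorem pvZeroLoop_eq (napis : String) (j : Nat) (fuel : Nat)
    (hn : 1 ≤ napis.toList.length)
    (hj : j ≤ min (napis.toList.takeWhile (· == '0')).length (napis.toList.length - 1))
    (hf : napis.toList.length - j < fuel) :
    pvZeroLoop napis (napis.toList.length : Int) ((j : Int) + 1) true fuel
      = ((min (napis.toList.takeWhile (· == '0')).length (napis.toList.length - 1) : Nat) : Int) + 1 := by
  induction fuel generalizing j with
  | zero => omega
  | succ fuel ih =>
    by_cases hlt : j < napis.toList.length - 1
    · rw [pvZeroLoop, if_pos (by constructor <;> [omega; rfl])]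
      rw [pv_znak napis j (by omega)]
      by_cases hz : j < (napis.toList.takeWhile (· == '0')).length
      · have : napis.toList[j]'(by omega) = '0' := by
          have := pv_takeWhile_getElem_true (· == '0') napis.toList j hz (by omega)
          simpa using this
        rw [if_pos this]
        have : ((j : Int) + 1 + 1) = ((j + 1 : Nat) : Int) + 1 := by push_cast; ring
        rw [this]
        exact ih (j + 1) (by omega) (by omega)
      · have hje : j = (napis.toList.takeWhile (· == '0')).length := by omega
        subst hje
        have : napis.toList[(napis.toList.takeWhile (· == '0')).length]'(by omega) ≠ '0' := by
          have := pv_takeWhile_getElem_false (· == '0') napis.toList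
            (by omega : (napis.toList.takeWhile (· == '0')).length < napis.toList.length)
          simpa using this
        rw [if_neg this, pvZeroLoop_false]
        congr 1
        omega
    · have hje : j = napis.toList.length - 1 := by omega
      rw [pvZeroLoop, if_neg (by rintro ⟨h, -⟩; omega)]
      congr 1
      omega

theorem pv_fragment_eq (napis : String) (i : Nat)
    (h1 : 1 ≤ i + 1) (h2 : i < napis.toList.length) :
    dajFragmentNapisu napis ((i : Int) + 1) ((napis.toList.length : Int) - ((i : Int) + 1) + 1)
      = String.ofList (napis.toList.drop i) := by
  unfold dajFragmentNapisu
  rw [if_pos (by constructor <;> omega)]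
  rw [if_pos (by constructor <;> omega)]
  rw [if_pos (by omega)]
  have ha : ((i : Int) + 1 - 1) = ((i : Nat) : Int) := by omega
  rw [ha]
  have hb : ((i : Nat) : Int) + ((napis.toList.length : Int) - ((i : Int) + 1) + 1)
      = ((napis.toList.length : Nat) : Int) := by ring
  rw [hb, PySem.List.slice_natCast]
  congr 1
  rw [List.take_of_length_le (by simp)]

-- ===== B-side lemmas =====

theorem pvParse_some (l : List Char) (a : Nat) (h : ∀ c ∈ l, pvDigit c = true) :
    pvParse? l a = some (l.foldl (fun a c => a * 10 + (c.toNat - 48)) a) := by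
  induction l generalizing a with
  | nil => rfl
  | cons c t ih =>
    have hc : pvDigit c = true := h c (by simp)
    have hc' : '0' ≤ c ∧ c ≤ '9' := by simpa [pvDigit] using hc
    rw [pvParse?, if_pos hc', List.foldl_cons]
    exact ih _ (fun d hd => h d (by simp [hd]))

theorem pvParse_none (l : List Char) (a : Nat) (h : ¬ ∀ c ∈ l, pvDigit c = true) :
    pvParse? l a = none := by
  induction l generalizing a with
  | nil => exact absurd (by simp) h
  | cons c t ih =>
    by_cases hc : pvDigit c = true
    · have hc' : '0' ≤ c ∧ c ≤ '9' := by simpa [pvDigit] using hc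
      rw [pvParse?, if_pos hc']
      apply ih
      intro ht
      exact h (by intro d hd; rcases List.mem_cons.mp hd with h1 | h2
                  · rw [h1]; exact hc
                  · exact ht d h2)
    · have hc' : ¬ ('0' ≤ c ∧ c ≤ '9') := by simpa [pvDigit] using hc
      rw [pvParse?, if_neg hc']

theorem pv_foldl_ge (l : List Char) (a : Nat) :
    a ≤ l.foldl (fun a c => a * 10 + (c.toNat - 48)) a := by
  induction l generalizing a with
  | nil => simp
  | cons c t ih =>
    rw [List.foldl_cons]
    exact le_trans (by omega) (ih (a * 10 + (c.toNat - 48)))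

theorem pvVal_pos (x : Char) (t : List Char) (hd : pvDigit x = true) (hx : x ≠ '0') :
    1 ≤ pvVal (x :: t) := by
  unfold pvVal
  rw [List.foldl_cons]
  have h1 : 1 ≤ x.toNat - 48 := pvDigit_ne_zero x hd hx
  exact le_trans (by omega) (pv_foldl_ge t (0 * 10 + (x.toNat - 48)))

theorem pvEmit_roundtrip (l : List Char) (acc : List Char)
    (hne : l ≠ []) (hd : ∀ c ∈ l, pvDigit c = true) (h0 : l.head? ≠ some '0') :
    pvEmit (pvVal l) acc = l ++ acc := by
  induction l using List.reverseRecOn generalizing acc with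
  | nil => exact absurd rfl hne
  | append_singleton init c ih =>
    have hc : pvDigit c = true := hd c (by simp)
    have hct := pvDigit_toNat c hc
    by_cases hinit : init = []
    · subst hinit
      simp only [List.nil_append]
      have hval : pvVal [c] = c.toNat - 48 := by simp [pvVal]
      rw [hval, pvEmit, if_neg (by omega)]
      simp [pvDigit_ofNat c hc]
    · obtain ⟨x, t, hxt⟩ := List.exists_cons_of_ne_nil hinit
      have hx0 : x ≠ '0' := by
        intro hx
        apply h0
        rw [hxt, hx]
        simp
      have hxd : pvDigit x = true := hd x (by rw [hxt]; simp)
      have hvinit : 1 ≤ pvVal init := by rw [hxt]; exact pvVal_pos x t hxd hx0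
      have hval : pvVal (init ++ [c]) = pvVal init * 10 + (c.toNat - 48) := by
        unfold pvVal
        rw [List.foldl_append]
        simp
      rw [hval, pvEmit, if_pos (by omega)]
      have hdiv : (pvVal init * 10 + (c.toNat - 48)) / 10 = pvVal init := by omega
      have hmod : (pvVal init * 10 + (c.toNat - 48)) % 10 = c.toNat - 48 := by omega
      rw [hdiv, hmod, pvDigit_ofNat c hc]
      rw [ih (c :: acc) hinit
        (fun d hdm => hd d (by simp [hdm]))
        (by rw [hxt] at h0 ⊢; simpa using h0)]
      simp

theorem pvVal_dropWhile (l : List Char) :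
    pvVal l = pvVal (l.dropWhile (· == '0')) := by
  induction l with
  | nil => rfl
  | cons c t ih =>
    by_cases hc : c = '0'
    · subst hc
      rw [List.dropWhile_cons_of_pos (by simp)]
      rw [← ih]
      unfold pvVal
      rw [List.foldl_cons]
      have h : 0 * 10 + ('0'.toNat - 48) = 0 := by decide
      rw [h]
    · rw [List.dropWhile_cons_of_neg (by simp [hc])]

theorem pv_dropWhile_head (l : List Char) :
    (l.dropWhile (· == '0')).head? ≠ some '0' := by
  induction l with
  | nil => simp
  | cons c t ih =>
    by_cases hc : c = '0'
    · subst hc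
      rw [List.dropWhile_cons_of_pos (by simp)]
      exact ih
    · rw [List.dropWhile_cons_of_neg (by simp [hc])]
      simp [hc]

theorem pvEmit_zero (acc : List Char) : pvEmit 0 acc = '0' :: acc := by
  rw [pvEmit, if_neg (by omega)]

-- B in terms of the dropWhile canonical form
theorem pv_alt_eq (napis : String) (hne : napis.toList ≠ [])
    (hall : napis.toList.all pvDigit = true) :
    dajLiczbeBezNieznaczacychZerNaPoczatku_alt napis
      = (if napis.toList.dropWhile (· == '0') = [] then "0"
         else String.ofList (napis.toList.dropWhile (· == '0'))) := by
  unfold dajLiczbeBezNieznaczacychZerNaPoczatku_alt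
  have hmem : ∀ c ∈ napis.toList, pvDigit c = true := by
    intro c hc; exact List.all_eq_true.mp hall c hc
  rw [pvParse_some napis.toList 0 hmem]
  simp only [if_neg hne]
  by_cases hdw : napis.toList.dropWhile (· == '0') = []
  · rw [if_pos hdw]
    have hv0 : pvVal napis.toList = 0 := by
      rw [pvVal_dropWhile, hdw]; rfl
    show String.ofList (pvEmit (pvVal napis.toList) []) = "0"
    rw [hv0, pvEmit_zero]
  · rw [if_neg hdw]
    show String.ofList (pvEmit (pvVal napis.toList) [])
        = String.ofList (napis.toList.dropWhile (· == '0'))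
    rw [pvVal_dropWhile]
    rw [pvEmit_roundtrip (napis.toList.dropWhile (· == '0')) [] hdw
      (fun c hc => hmem c ((List.dropWhile_sublist _ ).mem hc))
      (pv_dropWhile_head napis.toList)]
    simp

-- ===== VERDICT (by name: the statement is the Claim_ definition above) =====
theorem dajLiczbeBezNieznaczacychZerNaPoczatku_spec : Claim_equal_dajLiczbeBezNieznaczacychZerNaPoczatku := by
  intro napis _
  unfold Spec_dajLiczbeBezNieznaczacychZerNaPoczatku
  unfold dajLiczbeBezNieznaczacychZerNaPoczatku
  rw [pv_valid_eq]
  by_cases hv : napis.toList ≠ [] ∧ napis.toList.all pvDigit = true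
  · have hvb : (decide (napis.toList ≠ []) && napis.toList.all pvDigit) = true := by
      simp [hv.1, hv.2]
    rw [if_pos hvb, pv_alt_eq napis hv.1 hv.2]
    have hn : 1 ≤ napis.toList.length := by
      cases h : napis.toList with
      | nil => exact absurd h hv.1
      | cons a t => simp
    set z := (napis.toList.takeWhile (· == '0')).length with hz
    have hzle : z ≤ napis.toList.length := pv_takeWhile_length_le _ _
    have h0 : ((0 : Nat) : Int) + 1 = (1 : Int) := by norm_num
    have hloop := pvZeroLoop_eq napis 0 ((dajDlugoscNapisu napis).toNat + 2) hn (by omega)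
      (by unfold dajDlugoscNapisu; omega)
    rw [h0] at hloop
    unfold dajDlugoscNapisu at hloop ⊢
    rw [hloop]
    set m := min z (napis.toList.length - 1) with hm
    have hfrag := pv_fragment_eq napis m (by omega) (by omega)
    rw [hfrag]
    by_cases hall : z = napis.toList.length
    · -- every character is '0'
      have hm' : m = napis.toList.length - 1 := by omega
      have hdw : napis.toList.dropWhile (· == '0') = [] := by
        rw [pv_dropWhile_eq_drop, ← hz, hall, List.drop_length]
      rw [hdw, if_pos rfl, hm']
      have hlast : napis.toList.drop (napis.toList.length - 1)
          = [napis.toList[napis.toList.length - 1]'(by omega)] := by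
        rw [List.drop_eq_getElem_cons (by omega)]
        have : napis.toList.length - 1 + 1 = napis.toList.length := by omega
        rw [this, List.drop_length]
      have hc0 : napis.toList[napis.toList.length - 1]'(by omega) = '0' := by
        have := pv_takeWhile_getElem_true (· == '0') napis.toList (napis.toList.length - 1)
          (by omega) (by omega)
        simpa using this
      rw [hlast, hc0]
    · -- a nonzero digit exists: m = z and drop z = dropWhile
      have hm' : m = z := by omega
      have hdw : napis.toList.dropWhile (· == '0') = napis.toList.drop z := by
        rw [pv_dropWhile_eq_drop, hz]
      have hne : napis.toList.drop z ≠ [] := by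
        intro h
        have hlen := congrArg List.length h
        rw [List.length_drop] at hlen
        simp only [List.length_nil] at hlen
        omega
      rw [hdw, if_neg hne, hm']
  · have hvb : ¬ ((decide (napis.toList ≠ []) && napis.toList.all pvDigit) = true) := by
      simp only [Bool.and_eq_true, decide_eq_true_eq]
      exact hv
    rw [if_neg hvb]
    unfold dajLiczbeBezNieznaczacychZerNaPoczatku_alt
    by_cases hnil : napis.toList = []
    · rw [hnil]
      rfl
    · have hnall : ¬ ∀ c ∈ napis.toList, pvDigit c = true := by
        intro h
        exact hv ⟨hnil, List.all_eq_true.mpr h⟩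
      rw [pvParse_none napis.toList 0 hnall]
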